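-- pv_equiv track=rewrite | github.com/Benske1973/DERI | multi_scanner.py | categorize_coins
-- ===== SOURCE A (Python) =====
-- from typing import List, Dict, Optional, Tuple
--
-- def categorize_coins(pairs: List[dict]) -> Dict[str, List[str]]:
--     """Categoriseer coins op basis van volume/market cap proxy"""
--     categories = {
--         'large_cap': [],    # Top 20 by volume
--         'mid_cap': [],      # 21-100
--         'small_cap': [],    # 101-300
--         'micro_cap': [],    # 301+
--     }
--
--     for i, pair in enumerate(pairs):
--         symbol = pair['symbol']
--         if i < 20:
--             categories['large_cap'].append(symbol)
--         elif i < 100: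
--             categories['mid_cap'].append(symbol)
--         elif i < 300:
--             categories['small_cap'].append(symbol)
--         else:
--             categories['micro_cap'].append(symbol)
--
--     return categories
-- ===== SOURCE B (Python) =====
-- def _split(spec, syms):
--     """Recursively chunk `syms` according to a (name, size) spec table;
--     size None means 'all the rest'."""
--     if not spec:
--         return []
--     (name, size) = spec[0]
--     if size is None:
--         return [(name, syms)]
--     return [(name, syms[:size])] + _split(spec[1:], syms[size:])
--
-- _SPEC = [('large_cap', 20), ('mid_cap', 80), ('small_cap', 200), ('micro_cap', None)]
--
-- def categorize_coins(pairs):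
--     """Categoriseer coins op basis van volume/market cap proxy"""
--     return dict(_split(_SPEC, [p['symbol'] for p in pairs]))
-- ===== Notes on version B (the rewrite author's own statement) =====
-- stated objective: alternative
-- what changed: Replaces the enumerate loop with per-element index comparisons by one symbol-extraction pass followed by a generic recursive chunker driven by a (name, size) spec table [20, 80, 200, rest], with no indices or branching per element.
import Mathlib
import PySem

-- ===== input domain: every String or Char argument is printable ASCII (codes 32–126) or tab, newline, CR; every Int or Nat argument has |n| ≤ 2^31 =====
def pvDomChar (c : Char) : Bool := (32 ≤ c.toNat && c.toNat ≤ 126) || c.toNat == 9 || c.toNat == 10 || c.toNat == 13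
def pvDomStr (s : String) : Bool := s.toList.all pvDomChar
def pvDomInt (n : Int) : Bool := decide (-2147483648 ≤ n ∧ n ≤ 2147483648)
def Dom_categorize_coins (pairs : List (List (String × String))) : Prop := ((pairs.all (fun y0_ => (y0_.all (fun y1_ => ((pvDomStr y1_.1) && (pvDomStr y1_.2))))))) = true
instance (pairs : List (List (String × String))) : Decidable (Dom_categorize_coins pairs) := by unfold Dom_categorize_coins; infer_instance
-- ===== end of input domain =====

-- B replaces the enumerate loop with per-index comparisons by one symbol-extraction pass plus a
-- generic recursive chunker driven by a (name, size) spec table; equivalence of the RETURN value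
-- on inputs where every pair carries a 'symbol' key.

-- ===== PORT A =====
-- pair['symbol']: first-match assoc lookup; the "" default is never reached under Pre_ (Python raises KeyError there)
def pvSym (p : List (String × String)) : String := (PySem.Dict.mk p).getD "symbol" ""

-- one iteration of A's loop body on the four category lists (the fixed-key dict modelled by its four lists)
def pvStepA (c : List String × List String × List String × List String)
    (ip : Int × List (String × String)) : List String × List String × List String × List String :=
  let symbol := pvSym ip.2
  if ip.1 < 20 then (c.1 ++ [symbol], c.2.1, c.2.2.1, c.2.2.2)
  else if ip.1 < 100 then (c.1, c.2.1 ++ [symbol], c.2.2.1, c.2.2.2)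
  else if ip.1 < 300 then (c.1, c.2.1, c.2.2.1 ++ [symbol], c.2.2.2)
  else (c.1, c.2.1, c.2.2.1, c.2.2.2 ++ [symbol])

def categorize_coins (pairs : List (List (String × String))) : List (String × List String) :=
  let c := (PySem.List.enumerate pairs 0).foldl pvStepA ([], [], [], [])
  [("large_cap", c.1), ("mid_cap", c.2.1), ("small_cap", c.2.2.1), ("micro_cap", c.2.2.2)]

-- ===== PORT B =====
-- _split: structural recursion on the spec table; syms[:size] / syms[size:] with a nonnegative
-- literal size are exactly List.take / List.drop
def pvSplit : List (String × Option Nat) → List String → List (String × List String)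
  | [], _ => []
  | (name, none) :: _, syms => [(name, syms)]
  | (name, some size) :: rest, syms => [(name, syms.take size)] ++ pvSplit rest (syms.drop size)

def pvSpecTable : List (String × Option Nat) :=
  [("large_cap", some 20), ("mid_cap", some 80), ("small_cap", some 200), ("micro_cap", none)]

-- dict(...) over the four distinct names, as an insertion-ordered Dict
def categorize_coins_alt (pairs : List (List (String × String))) : List (String × List String) :=
  (PySem.Dict.ofList (pvSplit pvSpecTable (pairs.map pvSym))).items

-- ===== PRECONDITION & SPEC =====
-- Pre_ excludes inputs where some pair lacks a 'symbol' key: there Python A (and B) raise KeyError.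
def Pre_categorize_coins (pairs : List (List (String × String))) : Prop :=
  (pairs.all (fun p => p.any (fun kv => kv.1 == "symbol"))) = true
instance (pairs : List (List (String × String))) : Decidable (Pre_categorize_coins pairs) := by
  unfold Pre_categorize_coins; infer_instance
def pvWitness_categorize_coins : (List (List (String × String))) := [[("symbol", "BTC")], [("symbol", "ETH")]]

def Spec_categorize_coins (pairs : List (List (String × String))) (out : List (String × List String)) : Prop := out = categorize_coins_alt pairs
instance (pairs : List (List (String × String))) (out : List (String × List String)) : Decidable (Spec_categorize_coins pairs out) := by unfold Spec_categorize_coins; infer_instance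

-- ===== CLAIM (what is proved, stated in full; the proofs are below) =====
def Claim_equal_categorize_coins : Prop := ∀ (pairs : List (List (String × String))), Dom_categorize_coins pairs → Pre_categorize_coins pairs → Spec_categorize_coins pairs (categorize_coins pairs)

-- ===== LEMMAS AND PROOFS =====

-- the loop invariant: folding A's step over pairs enumerated from index i extends the four
-- accumulators by the pieces of `pairs` whose global index falls in [0,20), [20,100), [100,300), [300,∞)
theorem pvFoldA (pairs : List (List (String × String))) (i : Nat)
    (l m s u : List String) :
    (PySem.List.enumerate pairs (i : Int)).foldl pvStepA (l, m, s, u) =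
      (l ++ (pairs.take (20 - i)).map pvSym,
       m ++ ((pairs.drop (20 - i)).take ((100 - i) - (20 - i))).map pvSym,
       s ++ ((pairs.drop (100 - i)).take ((300 - i) - (100 - i))).map pvSym,
       u ++ (pairs.drop (300 - i)).map pvSym) := by
  induction pairs generalizing i l m s u with
  | nil => simp [PySem.List.enumerate_nil]
  | cons x rest ih =>
    rw [PySem.List.enumerate_cons]
    have h1 : ((i : Int) + 1) = ((i + 1 : Nat) : Int) := by push_cast; ring
    rw [List.foldl_cons, h1]
    rcases Nat.lt_or_ge i 20 with h | h
    · have hs : pvStepA (l, m, s, u) ((i : Int), x) = (l ++ [pvSym x], m, s, u) := by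
        simp only [pvStepA]; split_ifs with a <;> first | rfl | (exfalso; omega)
      rw [hs, ih]
      have e1 : 20 - i = (20 - (i + 1)) + 1 := by omega
      have e2 : 100 - i = (100 - (i + 1)) + 1 := by omega
      have e3 : 300 - i = (300 - (i + 1)) + 1 := by omega
      rw [e1, e2, e3]
      simp [List.take_succ_cons, List.drop_succ_cons]
    rcases Nat.lt_or_ge i 100 with h2 | h2
    · have hs : pvStepA (l, m, s, u) ((i : Int), x) = (l, m ++ [pvSym x], s, u) := by
        simp only [pvStepA]; split_ifs with a b <;> first | rfl | (exfalso; omega)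
      rw [hs, ih]
      have e1 : 20 - i = 0 := by omega
      have e1' : 20 - (i + 1) = 0 := by omega
      have e2 : 100 - i = (100 - (i + 1)) + 1 := by omega
      have e3 : 300 - i = (300 - (i + 1)) + 1 := by omega
      rw [e1, e1', e2, e3]
      simp [List.take_succ_cons, List.drop_succ_cons]
    rcases Nat.lt_or_ge i 300 with h3 | h3
    · have hs : pvStepA (l, m, s, u) ((i : Int), x) = (l, m, s ++ [pvSym x], u) := by
        simp only [pvStepA]; split_ifs with a b c <;> first | rfl | (exfalso; omega)
      rw [hs, ih]
      have e1 : 20 - i = 0 := by omega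
      have e1' : 20 - (i + 1) = 0 := by omega
      have e2 : 100 - i = 0 := by omega
      have e2' : 100 - (i + 1) = 0 := by omega
      have e3 : 300 - i = (300 - (i + 1)) + 1 := by omega
      rw [e1, e1', e2, e2', e3]
      simp [List.take_succ_cons, List.drop_succ_cons]
    · have hs : pvStepA (l, m, s, u) ((i : Int), x) = (l, m, s, u ++ [pvSym x]) := by
        simp only [pvStepA]; split_ifs with a b c <;> first | rfl | (exfalso; omega)
      rw [hs, ih]
      have e1 : 20 - i = 0 := by omega
      have e1' : 20 - (i + 1) = 0 := by omega
      have e2 : 100 - i = 0 := by omega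
      have e2' : 100 - (i + 1) = 0 := by omega
      have e3 : 300 - i = 0 := by omega
      have e3' : 300 - (i + 1) = 0 := by omega
      rw [e1, e1', e2, e2', e3, e3']
      simp

-- B's chunker on the literal spec table, then the Dict built from the four distinct names,
-- reduces to the plain four-entry list
theorem pvAltEq (pairs : List (List (String × String))) :
    categorize_coins_alt pairs =
      [("large_cap", ((pairs.map pvSym)).take 20),
       ("mid_cap", (((pairs.map pvSym)).drop 20).take 80),
       ("small_cap", ((((pairs.map pvSym)).drop 20).drop 80).take 200),
       ("micro_cap", ((((pairs.map pvSym)).drop 20).drop 80).drop 200)] := by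
  rfl

-- ===== VERDICT (by name: the statement is the Claim_ definition above) =====
theorem categorize_coins_spec : Claim_equal_categorize_coins := by
  intro pairs _ _
  unfold Spec_categorize_coins categorize_coins
  have h0 : (0 : Int) = ((0 : Nat) : Int) := rfl
  rw [h0, pvFoldA, pvAltEq]
  simp [List.map_take, List.map_drop, List.drop_drop]
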